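-- pv_equiv track=rewrite | github.com/Amranhossan123/Leetcode_Solutions_C_CPP_PYTHON | Hash_Table/961_N-Repeated Element in Size 2N Array.py | repeatedNTimes
-- ===== SOURCE A (Python) =====
-- from typing import List
--
-- def repeatedNTimes(nums: List[int]) -> int:
--     nums_dict=dict()
--     for i in nums:
--         if i in nums_dict:
--             nums_dict[i]+=1
--         else:
--             nums_dict[i]=1
--     flag=None
--     for key in nums_dict.keys():
--         if nums_dict[key]>1:
--             flag=key
--             break
--     if flag!=None:
--         return flag
-- ===== SOURCE B (Python) =====
-- from typing import List
--
-- def repeatedNTimes(nums: List[int]) -> int: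
--     s = sorted(nums)
--     dups = set()
--     for a, b in zip(s, s[1:]):
--         if a == b:
--             dups.add(a)
--     for e in nums:
--         if e in dups:
--             return e
-- ===== Notes on version B (the rewrite author's own statement) =====
-- stated objective: alternative
-- what changed: Replaces A's hash-counting (build a frequency dict, scan its keys for count>1) with sort-based duplicate detection: sort a copy, collect values occurring in adjacent equal pairs, then return the first element of nums in that set.
-- outside the precondition, e.g. on repeatedNTimes([1, 2, 3]): A returns None, B returns None
import Mathlib
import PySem

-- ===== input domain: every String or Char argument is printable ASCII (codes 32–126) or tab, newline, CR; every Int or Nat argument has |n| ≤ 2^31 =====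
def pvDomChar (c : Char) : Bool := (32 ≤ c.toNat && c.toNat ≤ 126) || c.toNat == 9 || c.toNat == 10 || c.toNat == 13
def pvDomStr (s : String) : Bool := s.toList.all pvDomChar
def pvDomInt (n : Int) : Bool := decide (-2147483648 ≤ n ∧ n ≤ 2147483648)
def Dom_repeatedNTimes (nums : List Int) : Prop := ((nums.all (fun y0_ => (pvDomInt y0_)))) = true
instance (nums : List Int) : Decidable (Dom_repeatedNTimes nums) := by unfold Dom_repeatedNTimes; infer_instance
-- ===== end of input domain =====

-- B replaces A's hash-counting (frequency dict, then key scan) with sort-based duplicate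
-- detection: sort a copy, collect values in adjacent equal pairs, return the first element
-- of nums in that set (alternative algorithm; not faster).

-- ===== PORT A =====
-- A: build nums_dict counting occurrences, then scan its keys (insertion order) for the
-- first key with count > 1 ('break'); 'return flag' only when flag is not None.
-- When no key qualifies, Python A returns None (no int); that case is excluded by Pre_
-- and the port returns 0 there.
def repeatedNTimes (nums : List Int) : Int :=
  let numsDict : PySem.Dict Int Int :=
    nums.foldl (fun d i =>
      if d.contains i then d.insert i (d.getD i 0 + 1) else d.insert i 1)
      PySem.Dict.empty
  let flag : Option Int := numsDict.keys.find? (fun key => numsDict.getD key 0 > 1)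
  flag.getD 0

-- ===== PORT B =====
-- B: s = sorted(nums); dups = {a for (a,b) in zip(s, s[1:]) if a == b};
-- 'for e in nums: if e in dups: return e'; falls through (None) only when no element
-- repeats — excluded by Pre_, the port returns 0 there.
def repeatedNTimes_alt (nums : List Int) : Int :=
  let s := PySem.List.sorted nums (fun x => x) false
  let dups : PySem.Set Int :=
    (s.zip (PySem.List.slice s (some 1) none)).foldl
      (fun d p => if p.1 == p.2 then PySem.Set.add d p.1 else d) PySem.Set.empty
  (nums.find? (fun e => PySem.Set.contains dups e)).getD 0

-- ===== PRECONDITION & SPEC =====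
-- Pre_ excludes lists with no repeated element: there both Pythons fall off the end and
-- return None, which is not a value of the declared int return type.
def Pre_repeatedNTimes (nums : List Int) : Prop := ∃ x ∈ nums, 1 < nums.count x
instance (nums : List Int) : Decidable (Pre_repeatedNTimes nums) := by
  unfold Pre_repeatedNTimes; infer_instance

def pvWitness_repeatedNTimes : List Int := [5, 1, 5]

def Spec_repeatedNTimes (nums : List Int) (out : Int) : Prop := out = repeatedNTimes_alt nums
instance (nums : List Int) (out : Int) : Decidable (Spec_repeatedNTimes nums out) := by
  unfold Spec_repeatedNTimes; infer_instance

-- ===== CLAIM (what is proved, stated in full; the proofs are below) =====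
def Claim_equal_repeatedNTimes : Prop :=
  ∀ (nums : List Int), Dom_repeatedNTimes nums → Pre_repeatedNTimes nums →
    Spec_repeatedNTimes nums (repeatedNTimes nums)

-- ===== LEMMAS AND PROOFS =====

-- find? only depends on the predicate's values on the list's elements
lemma find?_congr_mem {α : Type} (p q : α → Bool) :
    ∀ (xs : List α), (∀ x ∈ xs, p x = q x) → xs.find? p = xs.find? q
  | [], _ => rfl
  | x :: xs, h => by
    simp only [List.find?_cons, h x (List.mem_cons_self)]
    cases q x
    · exact find?_congr_mem p q xs (fun y hy => h y (List.mem_cons_of_mem _ hy))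
    · rfl

-- find? commutes with the ordered-dedup fold that builds a Python set
lemma find?_foldl_add (p : Int → Bool) : ∀ (xs s : List Int),
    ((xs.foldl PySem.Set.add s).find? p) = ((s.find? p).or (xs.find? p))
  | [], s => by simp
  | x :: xs, s => by
    rw [List.foldl_cons, find?_foldl_add p xs]
    unfold PySem.Set.add
    by_cases hc : PySem.Set.contains s x = true
    · simp only [hc, if_true, List.find?_cons]
      cases hp : p x
      · simp
      · have : (s.find? p).isSome := by
          rw [List.find?_isSome]
          exact ⟨x, by simpa [PySem.Set.contains] using hc, hp⟩
        cases h : s.find? p with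
        | none => simp [h] at this
        | some a => simp
    · simp only [hc, List.find?_cons]
      cases hp : p x <;> simp [hp]

-- the first p-element of set(xs) (first occurrences in order) is the first p-element of xs
lemma find?_ofList (p : Int → Bool) (xs : List Int) :
    (PySem.Set.ofList xs).find? p = xs.find? p := by
  rw [PySem.Set.ofList_eq_foldl, find?_foldl_add]; simp

-- A's counting loop builds exactly Counter(nums)
lemma foldA_eq_counter (nums : List Int) :
    nums.foldl (fun d i =>
        if d.contains i then d.insert i (d.getD i 0 + 1) else d.insert i 1)
      PySem.Dict.empty = PySem.Dict.counter nums := by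
  rw [← PySem.Dict.foldl_insert_getD_add_one_eq_counter]
  apply PySem.List.foldl_congr_mem
  intro d i _
  by_cases hc : d.contains i = true
  · simp [hc]
  · simp only [Bool.not_eq_true] at hc
    simp [hc, PySem.Dict.getD_of_not_contains d 0 hc]

-- membership in B's adjacent-equal-pairs set, for a ≤-sorted list l:
-- y is collected iff it occurs at least twice in l
lemma mem_adjdup_iff (y : Int) : ∀ (l : List Int) (d0 : PySem.Set Int),
    l.Pairwise (· ≤ ·) →
    (y ∈ (l.zip l.tail).foldl
        (fun d p => if p.1 == p.2 then PySem.Set.add d p.1 else d) d0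
      ↔ y ∈ d0 ∨ 2 ≤ l.count y)
  | [], d0, _ => by simp
  | [a], d0, _ => by
    simp [List.count_cons]
    intro h
    split at h <;> omega
  | a :: b :: t, d0, hp => by
    have hab : a ≤ b := (List.pairwise_cons.1 hp).1 b List.mem_cons_self
    have hbt : ∀ z ∈ t, b ≤ z := fun z hz =>
      (List.pairwise_cons.1 (List.pairwise_cons.1 hp).2).1 z hz
    have htail : (b :: t).Pairwise (· ≤ ·) := (List.pairwise_cons.1 hp).2
    show y ∈ ((a, b) :: (b :: t).zip t).foldl _ d0 ↔ _
    rw [List.foldl_cons]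
    have ih := mem_adjdup_iff y (b :: t)
      (if (a == b) = true then PySem.Set.add d0 a else d0) htail
    simp only [List.tail_cons] at ih
    rw [ih]
    rcases eq_or_ne a b with heq | hne
    · have hb : (a == b) = true := by simp [heq]
      simp only [List.count_cons, heq]
      by_cases hy : b = y
      · simp [hy.symm]
      · have hy' : ¬ y = b := fun h => hy h.symm
        simp [hy, hy']
    · have hb : (a == b) = false := by simp [hne]
      simp only [hb, Bool.false_eq_true, if_false, List.count_cons]
      by_cases hy : a = y
      · have hby : ¬ b = y := fun h => hne (hy.trans h.symm)
        have hlt : a < b := lt_of_le_of_ne hab hne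
        have h0 : List.count y t = 0 := by
          rw [List.count_eq_zero]
          intro hmem
          have hb' := hbt y hmem
          have : a < y := lt_of_lt_of_le hlt hb'
          omega
        simp [hby, hy, h0]
      · simp [hy]
  termination_by l => l.length

-- ===== VERDICT (by name: the statement is the Claim_ definition above) =====
theorem repeatedNTimes_spec : Claim_equal_repeatedNTimes := by
  intro nums _ _
  show repeatedNTimes nums = repeatedNTimes_alt nums
  have hA : repeatedNTimes nums
      = (nums.find? (fun key => decide ((nums.count key : Int) > 1))).getD 0 := by
    simp only [repeatedNTimes, foldA_eq_counter, PySem.Dict.keys_counter,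
      PySem.Dict.getD_counter, find?_ofList]
  rw [hA]
  unfold repeatedNTimes_alt
  congr 1
  apply find?_congr_mem
  intro e _
  have hpw : (PySem.List.sorted nums (fun x => x) false).Pairwise (· ≤ ·) := by
    have := PySem.List.sorted_pairwise nums (fun x => x)
    simpa using this
  have hperm := PySem.List.sorted_perm nums (fun x => x) false
  have hmem := mem_adjdup_iff e (PySem.List.sorted nums (fun x => x) false)
    PySem.Set.empty hpw
  rw [Bool.eq_iff_iff, decide_eq_true_iff, PySem.Set.contains_iff]
  rw [PySem.List.slice_from_one]
  rw [hmem, hperm.count_eq]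
  simp [PySem.Set.empty]
  omega
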